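-- pv_equiv track=rewrite | github.com/ThanhNhax/tool-find-domain | tool.py | iter_labels
-- ===== SOURCE A (Python) =====
-- from typing import Dict, Iterable, Iterator, List, Optional, Sequence, Tuple
--
-- ALPHABET = "abcdefghijklmnopqrstuvwxyz0123456789"
--
-- ALPHABET_INDEX = {ch: i for i, ch in enumerate(ALPHABET)}
--
-- BASE = len(ALPHABET)  # 36
--
-- def validate_label(label: str) -> None:
--     if not label:
--         raise ValueError("label is empty")
--     for ch in label:
--         if ch not in ALPHABET_INDEX:
--             raise ValueError(
--                 f"Invalid label '{label}': character '{ch}' not in allowed alphabet a-z0-9"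
--             )
--
-- def index_to_label(index: int, length: int) -> str:
--     """Convert 0 <= index < 36^length to base-36 string with fixed length."""
--     if length <= 0:
--         raise ValueError("length must be > 0")
--     max_index = BASE ** length
--     if index < 0 or index >= max_index:
--         raise ValueError(f"index out of range for length={length}: {index}")
--
--     chars = ["a"] * length
--     x = index
--     for pos in range(length - 1, -1, -1):
--         x, rem = divmod(x, BASE)
--         chars[pos] = ALPHABET[rem]
--     return "".join(chars)
--
-- def label_to_index(label: str) -> int:
--     """Convert base-36 label to integer index in [0, 36^len-1]."""
--     validate_label(label)
--     x = 0
--     for ch in label: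
--         x = x * BASE + ALPHABET_INDEX[ch]
--     return x
--
-- def iter_labels(min_len: int,
--                 max_len: int,
--                 start_label: Optional[str] = None,
--                 start_mode: str = "include") -> Iterator[str]:
--     """
--     Yield labels in order:
--       len=1: a..z 0..9
--       len=2: aa..99
--       ...
--     start_label: if provided, start at label (include) or after it.
--     """
--     if min_len < 1 or max_len < min_len:
--         raise ValueError("invalid min_len/max_len")
--
--     start_len = None
--     start_idx = None
--     if start_label is not None:
--         validate_label(start_label)
--         start_len = len(start_label)
--         start_idx = label_to_index(start_label)
--         if start_mode not in ("include", "after"):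
--             raise ValueError("start_mode must be 'include' or 'after'")
--         if start_mode == "after":
--             start_idx += 1
--
--     for length in range(min_len, max_len + 1):
--         total = BASE ** length
--
--         if start_label is None or start_len is None:
--             begin = 0
--         elif length < start_len:
--             continue
--         elif length == start_len:
--             begin = min(max(start_idx or 0, 0), total)
--         else:
--             begin = 0
--
--         for idx in range(begin, total):
--             yield index_to_label(idx, length)
-- ===== SOURCE B (Python) =====
-- from typing import Iterator, Optional
--
-- ALPHABET = "abcdefghijklmnopqrstuvwxyz0123456789"
--
-- ALPHABET_INDEX = {ch: i for i, ch in enumerate(ALPHABET)}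
--
-- BASE = len(ALPHABET)  # 36
--
--
-- def validate_label(label: str) -> None:
--     if not label:
--         raise ValueError("label is empty")
--     for ch in label:
--         if ch not in ALPHABET_INDEX:
--             raise ValueError(
--                 f"Invalid label '{label}': character '{ch}' not in allowed alphabet a-z0-9"
--             )
--
--
-- def label_to_index(label: str) -> int:
--     validate_label(label)
--     x = 0
--     for ch in label:
--         x = x * BASE + ALPHABET_INDEX[ch]
--     return x
--
--
-- def _labels(length: int) -> Iterator[str]:
--     """All labels of the given length, in counting order (last char fastest)."""
--     if length == 0:
--         yield ""
--     else:
--         for prefix in _labels(length - 1):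
--             for ch in ALPHABET:
--                 yield prefix + ch
--
--
-- def iter_labels(min_len: int,
--                 max_len: int,
--                 start_label: Optional[str] = None,
--                 start_mode: str = "include") -> Iterator[str]:
--     if min_len < 1 or max_len < min_len:
--         raise ValueError("invalid min_len/max_len")
--
--     start_len = None
--     start_idx = None
--     if start_label is not None:
--         validate_label(start_label)
--         start_len = len(start_label)
--         start_idx = label_to_index(start_label)
--         if start_mode not in ("include", "after"):
--             raise ValueError("start_mode must be 'include' or 'after'")
--         if start_mode == "after":
--             start_idx += 1
--
--     for length in range(min_len, max_len + 1):
--         if start_len is not None and length < start_len: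
--             continue
--         if start_len is not None and length == start_len:
--             begin = min(start_idx, BASE ** length)
--         else:
--             begin = 0
--         for i, lab in enumerate(_labels(length)):
--             if i >= begin:
--                 yield lab
-- ===== Notes on version B (the rewrite author's own statement) =====
-- stated objective: alternative
-- what changed: Labels are generated by a recursive cartesian-product generator (prefix + next char, last char fastest) with start-offset skipping via enumerate, instead of converting every integer index to base-36 via a per-index divmod loop; guards and errors are unchanged.
import Mathlib
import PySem

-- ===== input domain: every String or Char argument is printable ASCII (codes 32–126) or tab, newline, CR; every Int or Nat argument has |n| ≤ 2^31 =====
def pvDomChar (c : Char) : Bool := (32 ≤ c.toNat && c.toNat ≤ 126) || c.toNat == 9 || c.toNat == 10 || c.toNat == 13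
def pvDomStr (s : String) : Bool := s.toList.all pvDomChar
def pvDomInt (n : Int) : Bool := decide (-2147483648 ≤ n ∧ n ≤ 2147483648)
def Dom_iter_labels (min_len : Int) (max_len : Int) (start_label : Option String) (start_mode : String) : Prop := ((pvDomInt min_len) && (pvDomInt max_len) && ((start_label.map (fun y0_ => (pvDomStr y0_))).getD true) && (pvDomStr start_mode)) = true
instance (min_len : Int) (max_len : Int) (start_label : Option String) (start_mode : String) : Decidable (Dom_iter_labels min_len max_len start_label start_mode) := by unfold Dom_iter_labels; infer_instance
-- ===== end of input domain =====

-- B replaces A's per-index divmod base-36 conversion by a recursive cartesian-product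
-- enumeration of the labels (alternative algorithm, same cost); guards/errors unchanged.


-- ===== PORT A =====
-- shared module constants/helpers (identical source lines in Source A and Source B)
def pvAlphabet : List Char := "abcdefghijklmnopqrstuvwxyz0123456789".toList

-- validate_label as a check: true iff validate_label returns (no ValueError)
def pvLabelOk (s : List Char) : Bool := !s.isEmpty && s.all (pvAlphabet.contains ·)

-- ALPHABET_INDEX[ch] (the dict enumerates ALPHABET, so the value is ch's index; default
-- unreachable: callers validate first)
def pvAlphaIdx (ch : Char) : Int := ((PySem.List.index? pvAlphabet ch).getD 0 : Nat)

-- label_to_index (validation already done by callers on every admitted input)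
def pvLabelToIndex (s : List Char) : Int := s.foldl (fun x ch => x * 36 + pvAlphaIdx ch) 0

-- A's loop 'for pos in range(length-1, -1, -1)': fuel n processes positions n-1 … 0
def pvItlLoop : Nat → Int → List Char → List Char
  | 0, _, chars => chars
  | p + 1, x, chars =>
      pvItlLoop p (PySem.Int.floordiv x 36)
        (chars.set p (pvAlphabet.getD (PySem.Int.mod x 36).toNat 'a'))

-- index_to_label; the two ValueError branches return "" (unreachable from iter_labels)
def pvIndexToLabel (index : Int) (length : Int) : String :=
  if length ≤ 0 then ""
  else if index < 0 || (36 : Int) ^ length.toNat ≤ index then ""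
  else String.ofList (pvItlLoop length.toNat index (List.replicate length.toNat 'a'))

def iter_labels (min_len : Int) (max_len : Int) (start_label : Option String) (start_mode : String) : List String :=
  if min_len < 1 || max_len < min_len then []   -- ValueError, excluded by Pre_
  else
    match start_label with
    | none =>
        (PySem.List.pyRange min_len (max_len + 1) 1).flatMap (fun length =>
          let total : Int := (36 : Int) ^ length.toNat
          (PySem.List.pyRange 0 total 1).map (fun idx => pvIndexToLabel idx length))
    | some s =>
        if !pvLabelOk s.toList then []          -- validate_label ValueError, excluded by Pre_
        else
          let start_len : Int := (s.toList.length : Int)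
          let start_idx0 : Int := pvLabelToIndex s.toList
          if !(start_mode == "include" || start_mode == "after") then []  -- ValueError, excluded
          else
            let start_idx : Int := if start_mode == "after" then start_idx0 + 1 else start_idx0
            (PySem.List.pyRange min_len (max_len + 1) 1).flatMap (fun length =>
              let total : Int := (36 : Int) ^ length.toNat
              if length < start_len then []
              else
                let begin_ : Int :=
                  if length == start_len then
                    min (max (if start_idx == 0 then 0 else start_idx) 0) total
                  else 0
                (PySem.List.pyRange begin_ total 1).map (fun idx => pvIndexToLabel idx length))

-- ===== PORT B =====
-- _labels(length): all labels of the length, last char fastest (recursive product)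
def pvProdLabels : Nat → List (List Char)
  | 0 => [[]]
  | n + 1 => (pvProdLabels n).flatMap (fun w => pvAlphabet.map (fun c => w ++ [c]))

-- Source B's per-length loop 'for i, lab in enumerate(_labels(length)): if i >= begin: yield lab',
-- run over 'for length in range(min_len, max_len+1)'; info = (start_len, start_idx) or None
def pvGenLoop (min_len : Int) (max_len : Int) (info : Option (Int × Int)) : List String :=
  (PySem.List.pyRange min_len (max_len + 1) 1).flatMap (fun length =>
    match info with
    | some (sl, si) =>
        if length < sl then []
        else
          let begin_ : Int := if length == sl then min si ((36 : Int) ^ length.toNat) else 0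
          (PySem.List.enumerate (pvProdLabels length.toNat) 0).filterMap
            (fun p => if begin_ ≤ p.1 then some (String.ofList p.2) else none)
    | none =>
        (PySem.List.enumerate (pvProdLabels length.toNat) 0).filterMap
          (fun p => if (0 : Int) ≤ p.1 then some (String.ofList p.2) else none))

def iter_labels_alt (min_len : Int) (max_len : Int) (start_label : Option String) (start_mode : String) : List String :=
  if min_len < 1 || max_len < min_len then []   -- ValueError, excluded by Pre_
  else
    match start_label with
    | none => pvGenLoop min_len max_len none
    | some s =>
        if !pvLabelOk s.toList then []          -- validate_label ValueError, excluded by Pre_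
        else if !(start_mode == "include" || start_mode == "after") then []  -- ValueError, excluded
        else
          pvGenLoop min_len max_len
            (some ((s.toList.length : Int),
                   if start_mode == "after" then pvLabelToIndex s.toList + 1
                   else pvLabelToIndex s.toList))

-- ===== PRECONDITION & SPEC =====
-- Pre_ excludes exactly the ValueError inputs: min_len < 1 or max_len < min_len, an empty
-- or non-alphabet start_label, or (when start_label is given) a start_mode that is neither
-- 'include' nor 'after'.
def pvStartOk (start_label : Option String) (start_mode : String) : Bool :=
  match start_label with
  | none => true
  | some s => pvLabelOk s.toList && (start_mode == "include" || start_mode == "after")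

def Pre_iter_labels (min_len : Int) (max_len : Int) (start_label : Option String) (start_mode : String) : Prop :=
  1 ≤ min_len ∧ min_len ≤ max_len ∧ pvStartOk start_label start_mode = true
instance (min_len : Int) (max_len : Int) (start_label : Option String) (start_mode : String) : Decidable (Pre_iter_labels min_len max_len start_label start_mode) := by unfold Pre_iter_labels; infer_instance

def pvWitness_iter_labels : Int × Int × Option String × String := (1, 1, some "z", "after")

def Spec_iter_labels (min_len : Int) (max_len : Int) (start_label : Option String) (start_mode : String) (out : List String) : Prop := out = iter_labels_alt min_len max_len start_label start_mode
instance (min_len : Int) (max_len : Int) (start_label : Option String) (start_mode : String) (out : List String) : Decidable (Spec_iter_labels min_len max_len start_label start_mode out) := by unfold Spec_iter_labels; infer_instance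

-- ===== CLAIM (what is proved, stated in full; the proofs are below) =====
def Claim_equal_iter_labels : Prop := ∀ (min_len : Int) (max_len : Int) (start_label : Option String) (start_mode : String), Dom_iter_labels min_len max_len start_label start_mode → Pre_iter_labels min_len max_len start_label start_mode → Spec_iter_labels min_len max_len start_label start_mode (iter_labels min_len max_len start_label start_mode)

-- ===== LEMMAS AND PROOFS =====

-- proof-only helpers: digit-peeling form of A's inner loop
def pvItlInt : Nat → Int → List Char
  | 0, _ => []
  | n + 1, x =>
      pvItlInt n (PySem.Int.floordiv x 36) ++ [pvAlphabet.getD (PySem.Int.mod x 36).toNat 'a']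

def pvNatItl : Nat → Nat → List Char
  | 0, _ => []
  | n + 1, q => pvNatItl n (q / 36) ++ [pvAlphabet.getD (q % 36) 'a']

theorem pvItlLoop_append (n : Nat) : ∀ (x : Int) (chars t : List Char), n ≤ chars.length →
    pvItlLoop n x (chars ++ t) = pvItlLoop n x chars ++ t := by
  induction n with
  | zero => intro x chars t h; rfl
  | succ p ih =>
      intro x chars t h
      simp only [pvItlLoop]
      rw [List.set_append, if_pos (by omega)]
      exact ih _ _ _ (by simp; omega)

theorem pvItlLoop_replicate : ∀ (n : Nat) (x : Int),
    pvItlLoop n x (List.replicate n 'a') = pvItlInt n x := by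
  intro n
  induction n with
  | zero => intro x; rfl
  | succ p ih =>
      intro x
      simp only [pvItlLoop, pvItlInt]
      rw [List.replicate_succ', List.set_append, if_neg (by simp)]
      simp only [List.length_replicate, Nat.sub_self, List.set_cons_zero]
      rw [pvItlLoop_append p _ _ _ (by simp), ih]

theorem pvItlInt_cast (n : Nat) : ∀ (q : Nat), pvItlInt n (q : Int) = pvNatItl n q := by
  induction n with
  | zero => intro q; rfl
  | succ p ih =>
      intro q
      simp only [pvItlInt, pvNatItl]
      have h1 : PySem.Int.floordiv (q : Int) 36 = ((q / 36 : Nat) : Int) := by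
        rw [PySem.Int.floordiv_eq_ediv_of_pos (by omega)]; push_cast; rfl
      have h2 : (PySem.Int.mod (q : Int) 36).toNat = q % 36 := by
        rw [PySem.Int.mod_eq_emod_of_pos (by omega)]; omega
      rw [h1, h2, ih]

theorem pv_length_alphabet : pvAlphabet.length = 36 := by decide

theorem pv_length_prodLabels (n : Nat) : (pvProdLabels n).length = 36 ^ n := by
  induction n with
  | zero => rfl
  | succ p ih =>
      simp only [pvProdLabels, List.length_flatMap, List.length_map, pv_length_alphabet]
      rw [List.map_const', List.sum_replicate, smul_eq_mul, ih, pow_succ]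

theorem pv_getElem?_flatMap_const {α β : Type} (f : α → List β) (k : Nat) (hk : 0 < k)
    (hf : ∀ a, (f a).length = k) :
    ∀ (l : List α) (i : Nat), (l.flatMap f)[i]? = (l[i / k]?).bind (fun a => (f a)[i % k]?) := by
  intro l
  induction l with
  | nil => intro i; simp
  | cons a l ih =>
      intro i
      rw [List.flatMap_cons]
      by_cases h : i < k
      · rw [List.getElem?_append_left (by rw [hf]; exact h)]
        have h0 : i / k = 0 := Nat.div_eq_of_lt h
        have h1 : i % k = i := Nat.mod_eq_of_lt h
        simp [h0, h1]
      · have hik : k ≤ i := by omega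
        rw [List.getElem?_append_right (by rw [hf]; exact hik), hf, ih]
        have h0 : i / k = (i - k) / k + 1 := by
          obtain ⟨j, rfl⟩ := Nat.exists_eq_add_of_le hik
          rw [Nat.add_sub_cancel_left, Nat.add_div_left _ hk]
        have h1 : i % k = (i - k) % k := (Nat.mod_eq_sub_mod hik)
        rw [h0, ← h1]
        simp

theorem pv_prodLabels_getElem? : ∀ (n : Nat) (q : Nat), q < 36 ^ n →
    (pvProdLabels n)[q]? = some (pvNatItl n q) := by
  intro n
  induction n with
  | zero =>
      intro q hq
      interval_cases q
      rfl
  | succ p ih =>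
      intro q hq
      have hq36 : q / 36 < 36 ^ p := by
        rw [Nat.div_lt_iff_lt_mul (by omega)]
        calc q < 36 ^ (p + 1) := hq
        _ = 36 ^ p * 36 := by rw [pow_succ]
      have hmod : q % 36 < 36 := Nat.mod_lt _ (by omega)
      show ((pvProdLabels p).flatMap _)[q]? = _
      rw [pv_getElem?_flatMap_const _ 36 (by omega)
            (fun w => by rw [List.length_map, pv_length_alphabet]),
          ih _ hq36]
      simp only [Option.bind_some]
      rw [List.getElem?_map, List.getElem?_eq_getElem (by rw [pv_length_alphabet]; exact hmod)]
      simp only [Option.map_some, pvNatItl, Option.some.injEq]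
      rw [List.getD_eq_getElem _ _ (by rw [pv_length_alphabet]; exact hmod)]

-- A's per-length list equals the dropped product list
theorem pv_perLength (L : Int) (hL : 1 ≤ L) (b : Int) (hb0 : 0 ≤ b)
    (hbt : b ≤ (36 : Int) ^ L.toNat) :
    (PySem.List.pyRange b ((36 : Int) ^ L.toNat) 1).map (fun idx => pvIndexToLabel idx L)
      = ((pvProdLabels L.toNat).drop b.toNat).map String.ofList := by
  have hTcast : ((36 : Int) ^ L.toNat) = ((36 ^ L.toNat : Nat) : Int) := by push_cast; rfl
  rw [hTcast] at hbt
  rw [hTcast, PySem.List.pyRange_one]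
  apply List.ext_getElem
  · simp only [List.length_map, List.length_range, List.length_drop, pv_length_prodLabels]
    omega
  · intro k h1 h2
    simp only [List.length_map, List.length_range] at h1
    simp only [List.getElem_map, List.getElem_range, List.getElem_drop]
    rw [pvIndexToLabel, if_neg (by omega), hTcast]
    rw [if_neg (by simp only [Bool.or_eq_true, decide_eq_true_eq]; omega)]
    have hidx : (b + (k : Int)) = ((b.toNat + k : Nat) : Int) := by omega
    rw [pvItlLoop_replicate, hidx, pvItlInt_cast]
    have hlt : b.toNat + k < 36 ^ L.toNat := by omega
    have hsome := pv_prodLabels_getElem? L.toNat (b.toNat + k) hlt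
    rw [List.getElem?_eq_getElem (by rw [pv_length_prodLabels]; exact hlt),
        Option.some.injEq] at hsome
    rw [hsome]

-- Source B's enumerate-and-skip loop is a drop
theorem pv_enumFilter (b : Int) : ∀ (l : List (List Char)) (s : Int),
    (PySem.List.enumerate l s).filterMap
        (fun p => if b ≤ p.1 then some (String.ofList p.2) else none)
      = (l.drop (b - s).toNat).map String.ofList := by
  intro l
  induction l with
  | nil => intro s; simp [PySem.List.enumerate_nil]
  | cons x l ih =>
      intro s
      rw [PySem.List.enumerate_cons, List.filterMap_cons]
      by_cases h : b ≤ s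
      · rw [if_pos h, ih]
        have h0 : (b - s).toNat = 0 := by omega
        have h1 : (b - (s + 1)).toNat = 0 := by omega
        rw [h0, h1]
        simp
      · rw [if_neg h, ih]
        have h0 : (b - s).toNat = (b - (s + 1)).toNat + 1 := by omega
        rw [h0, List.drop_succ_cons]

theorem pv_alphaIdx_nonneg (ch : Char) : 0 ≤ pvAlphaIdx ch := by
  simp [pvAlphaIdx]

theorem pv_labelToIndex_nonneg (s : List Char) : 0 ≤ pvLabelToIndex s := by
  unfold pvLabelToIndex
  suffices h : ∀ (l : List Char) (x : Int), 0 ≤ x →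
      0 ≤ l.foldl (fun x ch => x * 36 + pvAlphaIdx ch) x from h s 0 le_rfl
  intro l
  induction l with
  | nil => intro x hx; exact hx
  | cons c l ih =>
      intro x hx
      exact ih _ (by have := pv_alphaIdx_nonneg c; nlinarith)

theorem pv_pow_pos (N : Nat) : (0 : Int) < (36 : Int) ^ N := by positivity

-- the two generation loops agree for any nonnegative start offset
theorem pv_loops_agree (ml xl : Int) (hml : 1 ≤ ml) (sl si : Int) (hsi : 0 ≤ si) :
    ((PySem.List.pyRange ml (xl + 1) 1).flatMap (fun length =>
        let total : Int := (36 : Int) ^ length.toNat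
        if length < sl then []
        else
          let begin_ : Int :=
            if length == sl then min (max (if si == 0 then 0 else si) 0) total else 0
          (PySem.List.pyRange begin_ total 1).map (fun idx => pvIndexToLabel idx length)))
      = pvGenLoop ml xl (some (sl, si)) := by
  unfold pvGenLoop
  apply List.flatMap_congr
  intro length hmem
  rw [PySem.List.mem_pyRange_one] at hmem
  have hL : 1 ≤ length := by omega
  simp only
  by_cases hlt : length < sl
  · rw [if_pos hlt, if_pos hlt]
  · rw [if_neg hlt, if_neg hlt]
    have hsi' : (if si == 0 then (0 : Int) else si) = si := by
      by_cases h0 : si = 0 <;> simp [h0]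
    rw [hsi', max_eq_left hsi]
    by_cases heq : length == sl
    · rw [if_pos heq]
      have hb0 : 0 ≤ min si ((36 : Int) ^ length.toNat) :=
        le_min hsi (le_of_lt (pv_pow_pos _))
      rw [pv_perLength length hL _ hb0 (min_le_right _ _), pv_enumFilter]
      rw [sub_zero]
    · rw [if_neg heq]
      rw [pv_perLength length hL 0 le_rfl (le_of_lt (pv_pow_pos _)), pv_enumFilter]
      norm_num

-- ===== VERDICT (by name: the statement is the Claim_ definition above) =====
theorem iter_labels_spec : Claim_equal_iter_labels := by
  intro ml xl sl sm _hdom hpre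
  obtain ⟨h1, h2, h3⟩ := hpre
  have hguard : ¬((decide (ml < 1) || decide (xl < ml)) = true) := by
    simp only [Bool.or_eq_true, decide_eq_true_eq]; omega
  unfold Spec_iter_labels
  cases sl with
  | none =>
      simp only [iter_labels, iter_labels_alt]
      rw [if_neg hguard, if_neg hguard]
      unfold pvGenLoop
      apply List.flatMap_congr
      intro length hmem
      rw [PySem.List.mem_pyRange_one] at hmem
      have hL : 1 ≤ length := by omega
      simp only
      rw [pv_perLength length hL 0 le_rfl (le_of_lt (pv_pow_pos _)), pv_enumFilter]
      norm_num
  | some s =>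
      simp only [pvStartOk, Bool.and_eq_true] at h3
      simp only [iter_labels, iter_labels_alt]
      have hA : ¬((!pvLabelOk s.toList) = true) := by simp [h3.1]
      have hB : ¬((!(sm == "include" || sm == "after")) = true) := by simp [h3.2]
      rw [if_neg hguard, if_neg hguard, if_neg hA, if_neg hA, if_neg hB, if_neg hB]
      exact pv_loops_agree ml xl h1 _ _
        (by by_cases hm : (sm == "after") = true
            · rw [if_pos hm]
              have := pv_labelToIndex_nonneg s.toList; omega
            · rw [if_neg hm]; exact pv_labelToIndex_nonneg s.toList)
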